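-- pv_equiv track=rewrite | github.com/huangjianhuster/toolbox | mdtraj_ana/general/ss_stride.py | parse_stride_output
-- ===== SOURCE A (Python) =====
-- def parse_stride_output(stride_output):
--     """Parse the STRIDE output to get secondary structure ranges."""
--     helices = []
--     sheets = []
--     loops = []
--
--     for line in stride_output.splitlines():
--         # Skip non-data lines
--         if not line.startswith("LOC"):
--             continue
--
--         # Split STRIDE output line into columns
--         columns = line.split()
--         ss_type = columns[1]
--         chainid = columns[4]
--         ss_range = (int(columns[3]), int(columns[6]))
--
--         if ss_type in ['AlphaHelix', '310Helix']:
--             helices.append((chainid, ss_range))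
--         elif ss_type in ['Strand', ]:
--             sheets.append((chainid, ss_range))
--         else:
--             loops.append((chainid, ss_range))
--     return helices, sheets, loops
-- ===== SOURCE B (Python) =====
-- def parse_stride_output(stride_output):
--     """Parse the STRIDE output to get secondary structure ranges."""
--     # One pass: parse every LOC line into a record table, then partition it.
--     records = []
--     for line in stride_output.splitlines():
--         if line.startswith("LOC"):
--             cols = line.split()
--             records.append((cols[4], (int(cols[3]), int(cols[6])), cols[1]))
--     helices = [(c, r) for (c, r, t) in records if t in ('AlphaHelix', '310Helix')]
--     sheets = [(c, r) for (c, r, t) in records if t == 'Strand']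
--     loops = [(c, r) for (c, r, t) in records
--              if t not in ('AlphaHelix', '310Helix', 'Strand')]
--     return helices, sheets, loops
-- ===== Notes on version B (the rewrite author's own statement) =====
-- stated objective: alternative
-- what changed: A classifies each LOC line into one of three output lists as it scans; B first parses all LOC lines into one record table (chainid, range, ss_type) in a single pass, then derives helices/sheets/loops by three order-preserving filters over that table.
import Mathlib
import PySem

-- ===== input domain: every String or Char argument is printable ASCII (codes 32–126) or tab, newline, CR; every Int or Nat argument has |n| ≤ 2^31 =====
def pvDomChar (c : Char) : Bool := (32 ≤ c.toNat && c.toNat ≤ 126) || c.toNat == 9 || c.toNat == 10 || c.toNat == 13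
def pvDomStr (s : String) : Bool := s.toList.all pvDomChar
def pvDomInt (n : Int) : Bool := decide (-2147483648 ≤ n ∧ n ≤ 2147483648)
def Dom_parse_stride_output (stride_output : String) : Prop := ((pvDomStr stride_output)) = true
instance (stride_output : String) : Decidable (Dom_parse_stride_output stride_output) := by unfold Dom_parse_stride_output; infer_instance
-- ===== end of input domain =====

-- B parses every LOC line into one record table in a single pass, then derives the three
-- output lists by three order-preserving filters over that table (objective: alternative).

-- ===== PORT A =====
-- A's loop body: classify each line into the three accumulators as it scans.
-- On lines where the Python raises (short LOC line / non-int field) Pre_ excludes the input;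
-- the port leaves the accumulator unchanged there.
def pvStepA (acc : (List (String × (Int × Int))) × (List (String × (Int × Int))) × (List (String × (Int × Int))))
    (line : String) : (List (String × (Int × Int))) × (List (String × (Int × Int))) × (List (String × (Int × Int))) :=
  if ¬ (PySem.Str.startswith line "LOC") then acc
  else
    let columns := PySem.Str.split₀ line
    match PySem.List.pyGet? columns 1, PySem.List.pyGet? columns 4,
          PySem.List.pyGet? columns 3, PySem.List.pyGet? columns 6 with
    | some ss_type, some chainid, some c3, some c6 =>
      match PySem.Int.ofStr? c3, PySem.Int.ofStr? c6 with
      | some a, some b =>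
        let ss_range : Int × Int := (a, b)
        if ss_type ∈ ["AlphaHelix", "310Helix"] then
          (acc.1 ++ [(chainid, ss_range)], acc.2.1, acc.2.2)
        else if ss_type ∈ ["Strand"] then
          (acc.1, acc.2.1 ++ [(chainid, ss_range)], acc.2.2)
        else
          (acc.1, acc.2.1, acc.2.2 ++ [(chainid, ss_range)])
      | _, _ => acc      -- ValueError (excluded by Pre_)
    | _, _, _, _ => acc  -- IndexError (excluded by Pre_)

def parse_stride_output (stride_output : String) : (List (String × (Int × Int))) × (List (String × (Int × Int))) × (List (String × (Int × Int))) :=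
  (PySem.Str.splitlines stride_output).foldl pvStepA ([], [], [])

-- ===== PORT B =====
-- B's parse of one line: some record (chainid, ss_range, ss_type) for a well-formed LOC line.
def pvParseLOC? (line : String) : Option (String × (Int × Int) × String) :=
  if PySem.Str.startswith line "LOC" then
    let cols := PySem.Str.split₀ line
    match PySem.List.pyGet? cols 1, PySem.List.pyGet? cols 4,
          PySem.List.pyGet? cols 3, PySem.List.pyGet? cols 6 with
    | some t, some c, some c3, some c6 =>
      match PySem.Int.ofStr? c3, PySem.Int.ofStr? c6 with
      | some x, some y => some (c, (x, y), t)
      | _, _ => none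
    | _, _, _, _ => none
  else none

def parse_stride_output_alt (stride_output : String) : (List (String × (Int × Int))) × (List (String × (Int × Int))) × (List (String × (Int × Int))) :=
  let records := (PySem.Str.splitlines stride_output).filterMap pvParseLOC?
  ((records.filter (fun r => r.2.2 ∈ ["AlphaHelix", "310Helix"])).map (fun r => (r.1, r.2.1)),
   (records.filter (fun r => r.2.2 == "Strand")).map (fun r => (r.1, r.2.1)),
   (records.filter (fun r => r.2.2 ∉ ["AlphaHelix", "310Helix", "Strand"])).map (fun r => (r.1, r.2.1)))

-- ===== PRECONDITION & SPEC =====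
-- A raises IndexError/ValueError on any line starting with "LOC" that has fewer than 7
-- whitespace-separated columns or whose 4th/7th column is not an int; Pre_ excludes exactly those.
def pvLineOK (line : String) : Bool :=
  !(PySem.Str.startswith line "LOC") ||
    (let cols := PySem.Str.split₀ line
     decide (7 ≤ cols.length) &&
     (PySem.Int.ofStr? (cols.getD 3 "")).isSome &&
     (PySem.Int.ofStr? (cols.getD 6 "")).isSome)

def Pre_parse_stride_output (stride_output : String) : Prop :=
  (PySem.Str.splitlines stride_output).all pvLineOK = true
instance (stride_output : String) : Decidable (Pre_parse_stride_output stride_output) := by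
  unfold Pre_parse_stride_output; infer_instance

def pvWitness_parse_stride_output : String :=
  "LOC AlphaHelix A 1 A A 5\nLOC Strand B 2 B B 9\nother line"

def Spec_parse_stride_output (stride_output : String) (out : (List (String × (Int × Int))) × (List (String × (Int × Int))) × (List (String × (Int × Int)))) : Prop := out = parse_stride_output_alt stride_output
instance (stride_output : String) (out : (List (String × (Int × Int))) × (List (String × (Int × Int))) × (List (String × (Int × Int)))) : Decidable (Spec_parse_stride_output stride_output out) := by unfold Spec_parse_stride_output; infer_instance

-- ===== CLAIM (what is proved, stated in full; the proofs are below) =====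
def Claim_equal_parse_stride_output : Prop := ∀ (stride_output : String), Dom_parse_stride_output stride_output → Pre_parse_stride_output stride_output → Spec_parse_stride_output stride_output (parse_stride_output stride_output)

-- ===== LEMMAS AND PROOFS =====

-- On an OK line, A's step appends to exactly the component that B's record filters select.
theorem pvStep_eq (line : String) (hok : pvLineOK line = true)
    (acc : (List (String × (Int × Int))) × (List (String × (Int × Int))) × (List (String × (Int × Int)))) :
    pvStepA acc line =
      (acc.1 ++ (((pvParseLOC? line).toList.filter (fun r => r.2.2 ∈ ["AlphaHelix", "310Helix"])).map (fun r => (r.1, r.2.1))),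
       acc.2.1 ++ (((pvParseLOC? line).toList.filter (fun r => r.2.2 == "Strand")).map (fun r => (r.1, r.2.1))),
       acc.2.2 ++ (((pvParseLOC? line).toList.filter (fun r => r.2.2 ∉ ["AlphaHelix", "310Helix", "Strand"])).map (fun r => (r.1, r.2.1)))) := by
  by_cases hs : PySem.Str.startswith line "LOC"
  · simp only [pvLineOK, hs, Bool.not_true, Bool.false_or, Bool.and_eq_true,
      decide_eq_true_eq, Option.isSome_iff_exists] at hok
    obtain ⟨⟨hlen, x, hx⟩, y, hy⟩ := hok
    set cols := PySem.Str.split₀ line with hcols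
    match cols, hlen with
    | c0 :: c1 :: c2 :: c3 :: c4 :: c5 :: c6 :: rest, _ =>
      simp only [List.getD, List.getElem?_cons_succ, List.getElem?_cons_zero,
        Option.getD_some] at hx hy
      have h1 : PySem.List.pyGet? (PySem.Str.split₀ line) (1 : Int) = some c1 := by
        rw [← hcols]; simp [PySem.List.pyGet?, PySem.List.pyIdx?]; rw [if_pos (by omega)]; simp
      have h3' : PySem.List.pyGet? (PySem.Str.split₀ line) (3 : Int) = some c3 := by
        rw [← hcols]; simp [PySem.List.pyGet?, PySem.List.pyIdx?]; rw [if_pos (by omega)]; simp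
      have h4 : PySem.List.pyGet? (PySem.Str.split₀ line) (4 : Int) = some c4 := by
        rw [← hcols]; simp [PySem.List.pyGet?, PySem.List.pyIdx?]; rw [if_pos (by omega)]; simp
      have h6' : PySem.List.pyGet? (PySem.Str.split₀ line) (6 : Int) = some c6 := by
        rw [← hcols]; simp [PySem.List.pyGet?, PySem.List.pyIdx?]; rw [if_pos (by omega)]; simp
      simp only [pvStepA, pvParseLOC?, hs, if_true, h1, h3', h4, h6', hx, hy]
      simp only [List.mem_cons, List.not_mem_nil, or_false]
      by_cases hA : c1 = "AlphaHelix" ∨ c1 = "310Helix"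
      · rw [if_pos hA]; rcases hA with h | h <;> subst h <;> simp
      · rw [if_neg hA, not_or] at *
        by_cases hS : c1 = "Strand"
        · rw [if_pos hS]; subst hS; simp
        · rw [if_neg hS]; simp [hA.1, hA.2, hS]
  · rw [Bool.not_eq_true] at hs
    simp only [PySem.Str.startswith_eq, show "LOC".toList = ['L', 'O', 'C'] from rfl] at hs
    simp [pvStepA, pvParseLOC?, hs]

theorem pvFold_eq (lines : List String) (h : lines.all pvLineOK = true)
    (acc : (List (String × (Int × Int))) × (List (String × (Int × Int))) × (List (String × (Int × Int)))) :
    lines.foldl pvStepA acc =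
      (acc.1 ++ (((lines.filterMap pvParseLOC?).filter (fun r => r.2.2 ∈ ["AlphaHelix", "310Helix"])).map (fun r => (r.1, r.2.1))),
       acc.2.1 ++ (((lines.filterMap pvParseLOC?).filter (fun r => r.2.2 == "Strand")).map (fun r => (r.1, r.2.1))),
       acc.2.2 ++ (((lines.filterMap pvParseLOC?).filter (fun r => r.2.2 ∉ ["AlphaHelix", "310Helix", "Strand"])).map (fun r => (r.1, r.2.1)))) := by
  induction lines generalizing acc with
  | nil => simp
  | cons l ls ih =>
    simp only [List.all_cons, Bool.and_eq_true] at h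
    rw [List.foldl_cons, pvStep_eq l h.1, ih h.2]
    cases hp : pvParseLOC? l
    · simp [hp]
    · simp only [List.filterMap_cons, hp, List.filter_cons]
      split_ifs <;> (simp_all [List.filter_cons]; try tauto)

-- ===== VERDICT (by name: the statement is the Claim_ definition above) =====
theorem parse_stride_output_spec : Claim_equal_parse_stride_output := by
  intro s _ hpre
  unfold Spec_parse_stride_output parse_stride_output parse_stride_output_alt
  rw [pvFold_eq _ hpre]
  simp
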